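-- pv_equiv track=rewrite | github.com/cgasp/another-iperf3-wrapper | another-iperf3-wrapper/bufferbloat.py | bufferbloat_grade
-- ===== SOURCE A (Python) =====
-- def bufferbloat_grade(effective_latency_inc):
--     """return grade from given effective_latency_inc
--     # source: http://www.dslreports.com/faq/17930
--
--     Args:
--         effective_latency_inc (str): grade with description
--     """
--
--     # default result
--     grade = "F - 400 ms or greater latency increase"
--
--     grades = {
--         5: "A+ - Less than 5 ms latency increase",
--         30: "A - Less than 30 ms latency increase",
--         60: "B - Less than 60 ms latency increase",
--         200: "C - Less than 200 ms latency increase",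
--         400: "D - Less than 400 ms latency increase",
--     }
--
--     for latency_grade, g in grades.items():
--         if effective_latency_inc < latency_grade:
--             grade = g
--             break
--
--     return grade
-- ===== SOURCE B (Python) =====
-- import bisect
--
-- _THRESHOLDS = [5, 30, 60, 200, 400]
-- _GRADES = [
--     "A+ - Less than 5 ms latency increase",
--     "A - Less than 30 ms latency increase",
--     "B - Less than 60 ms latency increase",
--     "C - Less than 200 ms latency increase",
--     "D - Less than 400 ms latency increase",
--     "F - 400 ms or greater latency increase",
-- ]
--
--
-- def bufferbloat_grade(effective_latency_inc):
--     return _GRADES[bisect.bisect_right(_THRESHOLDS, effective_latency_inc)]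
-- ===== Notes on version B (the rewrite author's own statement) =====
-- stated objective: idiomatic
-- what changed: Replaces the linear scan over a dict of thresholds (first 'x < t' wins, else a default) with a table lookup indexed by bisect.bisect_right on the sorted threshold array (binary search).
import Mathlib
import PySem

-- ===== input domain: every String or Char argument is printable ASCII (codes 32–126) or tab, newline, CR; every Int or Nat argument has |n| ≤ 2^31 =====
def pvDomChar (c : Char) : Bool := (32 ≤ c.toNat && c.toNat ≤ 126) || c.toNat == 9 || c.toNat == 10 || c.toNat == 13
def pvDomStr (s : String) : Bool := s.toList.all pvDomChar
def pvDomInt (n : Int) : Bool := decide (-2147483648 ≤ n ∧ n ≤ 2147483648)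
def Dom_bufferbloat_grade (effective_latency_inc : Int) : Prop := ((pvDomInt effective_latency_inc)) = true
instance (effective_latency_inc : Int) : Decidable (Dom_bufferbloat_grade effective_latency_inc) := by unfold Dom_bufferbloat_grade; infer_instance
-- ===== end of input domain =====

-- B replaces A's linear first-match scan over a threshold dict with a grade-table
-- lookup indexed by bisect_right (binary search) on the sorted thresholds; same values.

-- ===== PORT A =====
-- A's dict of thresholds, in insertion order.
def pvGradesDict : List (Int × String) :=
  [(5, "A+ - Less than 5 ms latency increase"),
   (30, "A - Less than 30 ms latency increase"),
   (60, "B - Less than 60 ms latency increase"),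
   (200, "C - Less than 200 ms latency increase"),
   (400, "D - Less than 400 ms latency increase")]

-- the for-loop with break: first item whose threshold exceeds x, else the default grade
def pvGradeLoop (x : Int) : List (Int × String) → String → String
  | [], grade => grade
  | (t, g) :: rest, grade =>
    if x < t then g else pvGradeLoop x rest grade

def bufferbloat_grade (effective_latency_inc : Int) : String :=
  pvGradeLoop effective_latency_inc pvGradesDict
    "F - 400 ms or greater latency increase"

-- ===== PORT B =====
def pvThresholds : List Int := [5, 30, 60, 200, 400]

def pvGrades : List String :=
  ["A+ - Less than 5 ms latency increase",
   "A - Less than 30 ms latency increase",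
   "B - Less than 60 ms latency increase",
   "C - Less than 200 ms latency increase",
   "D - Less than 400 ms latency increase",
   "F - 400 ms or greater latency increase"]

-- bisect.bisect_right, transliterated (fuel = list length suffices: hi-lo halves each step)
def pvBisectRight (a : List Int) (x : Int) : Nat → Nat → Nat → Nat
  | 0, lo, _ => lo
  | fuel + 1, lo, hi =>
    if lo < hi then
      let mid := (lo + hi) / 2
      if x < a.getD mid 0 then pvBisectRight a x fuel lo mid
      else pvBisectRight a x fuel (mid + 1) hi
    else lo

def bufferbloat_grade_alt (effective_latency_inc : Int) : String :=
  pvGrades.getD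
    (pvBisectRight pvThresholds effective_latency_inc
      pvThresholds.length 0 pvThresholds.length) ""

-- ===== PRECONDITION & SPEC =====
def Spec_bufferbloat_grade (effective_latency_inc : Int) (out : String) : Prop := out = bufferbloat_grade_alt effective_latency_inc
instance (effective_latency_inc : Int) (out : String) : Decidable (Spec_bufferbloat_grade effective_latency_inc out) := by unfold Spec_bufferbloat_grade; infer_instance

-- ===== CLAIM (what is proved, stated in full; the proofs are below) =====
def Claim_equal_bufferbloat_grade : Prop := ∀ (effective_latency_inc : Int), Dom_bufferbloat_grade effective_latency_inc → Spec_bufferbloat_grade effective_latency_inc (bufferbloat_grade effective_latency_inc)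

-- ===== LEMMAS AND PROOFS =====

-- ===== VERDICT (by name: the statement is the Claim_ definition above) =====
theorem bufferbloat_grade_spec : Claim_equal_bufferbloat_grade := by
  intro x _
  unfold Spec_bufferbloat_grade bufferbloat_grade bufferbloat_grade_alt
  by_cases h5 : x < 5
  · have h30 : x < (30 : Int) := by omega
    have h60 : x < (60 : Int) := by omega
    simp [pvGradeLoop, pvBisectRight, pvGradesDict, pvThresholds, pvGrades, h5, h30, h60]
  · by_cases h30 : x < 30
    · have h60 : x < (60 : Int) := by omega
      simp [pvGradeLoop, pvBisectRight, pvGradesDict, pvThresholds, pvGrades, h5, h30, h60]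
    · by_cases h60 : x < 60
      · simp [pvGradeLoop, pvBisectRight, pvGradesDict, pvThresholds, pvGrades, h5, h30, h60]
      · by_cases h200 : x < 200
        · have h400 : x < (400 : Int) := by omega
          simp [pvGradeLoop, pvBisectRight, pvGradesDict, pvThresholds, pvGrades, h5, h30, h60, h200, h400]
        · by_cases h400 : x < 400
          · simp [pvGradeLoop, pvBisectRight, pvGradesDict, pvThresholds, pvGrades, h5, h30, h60, h200, h400]
          · simp [pvGradeLoop, pvBisectRight, pvGradesDict, pvThresholds, pvGrades, h5, h30, h60, h200, h400]
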